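-- pv_equiv track=rewrite | github.com/CarlosAraujo7/Fundamentals-of-Programming-Assignments | Trabalho 3.py | valor_palavra
-- ===== SOURCE A (Python) =====
-- def valor_palavra(palavra):
--     """ (str) -> int
--
--     Retorna os pontos obtidos ao encontrar a palavra.
--
--     comprimento da palavra: < 3: 0 pontos
--                             3-6: 1 ponto por caractere, para todos caracteres na palavra
--                             7-9: 2 pontos por caractere, para todos caracteres na palavra
--                             10+: 3 pontos por caractere, para todos caracteres na palavra
--
--     >>> valor_palavra('DRUDGERY')
--     16
--     >>> valor_palavra('DUSTIN')
--     6
--     >>> valor_palavra('DOPELGANGER')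
--     33
--     """
--     p = 0
--     if len(palavra) < 3:
--         for pontos in range(len(palavra)):
--             p = 0
--
--     elif len(palavra) > 3 and len(palavra) <= 6:
--         for pontos in range(len(palavra)):
--             p += 1
--     elif len(palavra) > 6 and len(palavra) <= 9:
--         for pontos in range(len(palavra)):
--             p += 2
--     elif len(palavra) >= 10:
--         for pontos in range(len(palavra)):
--             p += 3
--     return p
-- ===== SOURCE B (Python) =====
-- def valor_palavra(palavra):
--     n = len(palavra)
--     mult = 0 if n <= 3 else 1 if n <= 6 else 2 if n <= 9 else 3
--     return n * mult
-- ===== Notes on version B (the rewrite author's own statement) =====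
-- stated objective: simpler
-- what changed: Replaced the four per-character accumulation loops by a closed-form length-bracket multiplier times the length (preserving A's len==3 fall-through that yields 0).
import Mathlib
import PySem

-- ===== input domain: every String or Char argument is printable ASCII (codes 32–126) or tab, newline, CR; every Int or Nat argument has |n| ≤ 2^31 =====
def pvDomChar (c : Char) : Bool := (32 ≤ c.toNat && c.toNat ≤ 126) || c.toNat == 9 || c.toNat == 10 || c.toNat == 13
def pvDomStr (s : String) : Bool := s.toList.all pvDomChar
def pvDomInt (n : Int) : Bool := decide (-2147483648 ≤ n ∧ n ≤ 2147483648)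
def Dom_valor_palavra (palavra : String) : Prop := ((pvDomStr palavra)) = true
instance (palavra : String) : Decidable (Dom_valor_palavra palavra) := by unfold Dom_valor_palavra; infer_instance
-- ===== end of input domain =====

-- B replaces A's four per-character accumulation loops by a closed-form length-bracket multiplier times the length (simpler; same values, including 0 at length 3).


-- ===== PORT A =====
def valor_palavra (palavra : String) : Int :=
  let p : Int := 0
  if PySem.Str.len palavra < 3 then
    (PySem.List.pyRange 0 (PySem.Str.len palavra) 1).foldl (fun _ _ => (0 : Int)) p
  else if PySem.Str.len palavra > 3 ∧ PySem.Str.len palavra ≤ 6 then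
    (PySem.List.pyRange 0 (PySem.Str.len palavra) 1).foldl (fun p _ => p + 1) p
  else if PySem.Str.len palavra > 6 ∧ PySem.Str.len palavra ≤ 9 then
    (PySem.List.pyRange 0 (PySem.Str.len palavra) 1).foldl (fun p _ => p + 2) p
  else if PySem.Str.len palavra ≥ 10 then
    (PySem.List.pyRange 0 (PySem.Str.len palavra) 1).foldl (fun p _ => p + 3) p
  else p

-- ===== PORT B =====
def valor_palavra_alt (palavra : String) : Int :=
  let n : Int := PySem.Str.len palavra
  let mult : Int := if n ≤ 3 then 0 else if n ≤ 6 then 1 else if n ≤ 9 then 2 else 3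
  n * mult

-- ===== PRECONDITION & SPEC =====
def Spec_valor_palavra (palavra : String) (out : Int) : Prop := out = valor_palavra_alt palavra
instance (palavra : String) (out : Int) : Decidable (Spec_valor_palavra palavra out) := by unfold Spec_valor_palavra; infer_instance

-- ===== CLAIM (what is proved, stated in full; the proofs are below) =====
def Claim_equal_valor_palavra : Prop := ∀ (palavra : String), Dom_valor_palavra palavra → Spec_valor_palavra palavra (valor_palavra palavra)

-- ===== LEMMAS AND PROOFS =====

-- ===== VERDICT (by name: the statement is the Claim_ definition above) =====
-- foldl adding a constant c over a list = start + c * length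
theorem pv_foldl_const_add (l : List Int) (a c : Int) :
    l.foldl (fun p _ => p + c) a = a + c * l.length := by
  induction l generalizing a with
  | nil => simp
  | cons x xs ih => simp [List.foldl, ih]; ring

theorem pv_foldl_const_zero (l : List Int) (a : Int) :
    l.foldl (fun _ _ => (0 : Int)) a = if l = [] then a else 0 := by
  induction l generalizing a with
  | nil => simp
  | cons x xs ih => simp [List.foldl, ih]

theorem valor_palavra_spec : Claim_equal_valor_palavra := by
  intro palavra _
  unfold Spec_valor_palavra valor_palavra valor_palavra_alt
  set n : Int := PySem.Str.len palavra with hn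
  have hn0 : 0 ≤ n := by rw [hn, PySem.Str.len_eq]; positivity
  simp only [pv_foldl_const_zero, pv_foldl_const_add, PySem.List.length_pyRange_one, ite_self]
  split_ifs <;> omega
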